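-- pv_equiv track=rewrite | github.com/wesley-ruedebusch/cs-sprint-challenge-hash-tables | hashtables/ex4/ex4.py | has_negatives
-- ===== SOURCE A (Python) =====
-- def has_negatives(a):
--     """
--     YOUR CODE HERE
--     """
--     num_table = {}
--     result = []
--
--     for n in a:
--
--         # input number into dictionary
--         num_table[n] = n
--         # check to see if negative version is in dict
--         # `0` doesn't have a negative version - fixes large test
--         if n != 0 and -n in num_table:
--             result.append(abs(n)) # abs() b/c input could give neg value first
--
--     return result
-- ===== SOURCE B (Python) =====
-- def has_negatives(a):
--     # Stage 1: first-occurrence index of every value, built by a reverse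
--     # overwrite pass (earlier entries overwrite later ones).
--     first = {}
--     for i, n in reversed(list(enumerate(a))):
--         first[n] = i
--     # Stage 2: n contributes iff the first occurrence of -n is strictly earlier.
--     return [abs(n) for i, n in enumerate(a) if n != 0 and first.get(-n, i) < i]
-- ===== Notes on version B (the rewrite author's own statement) =====
-- stated objective: alternative
-- what changed: Replaces A's single pass with a running seen-dict by two staged passes: a reverse overwrite pass precomputes the first-occurrence index of every value, then a comprehension emits abs(n) when the first occurrence of -n has a strictly smaller index; the temporal 'seen so far' membership test becomes an index comparison against a fully precomputed table.
import Mathlib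
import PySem

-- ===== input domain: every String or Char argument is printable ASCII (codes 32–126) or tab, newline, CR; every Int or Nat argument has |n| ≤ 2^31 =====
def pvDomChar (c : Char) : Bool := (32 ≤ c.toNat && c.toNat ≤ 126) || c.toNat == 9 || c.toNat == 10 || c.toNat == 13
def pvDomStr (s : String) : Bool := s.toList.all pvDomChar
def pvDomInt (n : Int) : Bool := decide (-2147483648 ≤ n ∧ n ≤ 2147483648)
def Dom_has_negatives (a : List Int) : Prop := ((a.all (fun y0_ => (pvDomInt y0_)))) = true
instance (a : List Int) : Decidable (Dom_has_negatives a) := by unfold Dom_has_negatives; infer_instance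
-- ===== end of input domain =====

-- B replaces A's running seen-dict pass by two staged passes: a reverse overwrite pass precomputing
-- first-occurrence indices, then a comprehension comparing indices; objective: alternative.


-- ===== PORT A =====
-- loop state: (num_table, result); 'n != 0 and -n in num_table' checked after inserting n
def has_negatives (a : List Int) : List Int :=
  (a.foldl
    (fun (st : PySem.Dict Int Int × List Int) n =>
      let d := st.1.insert n n
      if n ≠ 0 ∧ d.contains (-n) then (d, st.2 ++ [|n|]) else (d, st.2))
    (PySem.Dict.empty, [])).2

-- ===== PORT B =====
-- Stage 1: 'for i, n in reversed(list(enumerate(a))): first[n] = i'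
def hnFirst (a : List Int) : PySem.Dict Int Int :=
  (PySem.List.enumerate a 0).reverse.foldl (fun d p => d.insert p.2 p.1) PySem.Dict.empty

-- Stage 2: '[abs(n) for i, n in enumerate(a) if n != 0 and first.get(-n, i) < i]'
def has_negatives_alt (a : List Int) : List Int :=
  let first := hnFirst a
  (PySem.List.enumerate a 0).foldl
    (fun res p => if p.2 ≠ 0 ∧ first.getD (-p.2) p.1 < p.1 then res ++ [|p.2|] else res)
    []

-- ===== PRECONDITION & SPEC =====
def Spec_has_negatives (a : List Int) (out : List Int) : Prop := out = has_negatives_alt a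
instance (a : List Int) (out : List Int) : Decidable (Spec_has_negatives a out) := by unfold Spec_has_negatives; infer_instance

-- ===== CLAIM (what is proved, stated in full; the proofs are below) =====
def Claim_equal_has_negatives : Prop := ∀ (a : List Int), Dom_has_negatives a → Spec_has_negatives a (has_negatives a)

-- ===== LEMMAS AND PROOFS =====

-- common reference function: contributions of l given already-seen prefix p
def hnRef (p l : List Int) : List Int :=
  match l with
  | [] => []
  | n :: l => (if n ≠ 0 ∧ -n ∈ p then [|n|] else []) ++ hnRef (p ++ [n]) l

def hnDict (p : List Int) : PySem.Dict Int Int :=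
  p.foldl (fun d n => d.insert n n) PySem.Dict.empty

lemma hnDict_contains (p : List Int) (k : Int) :
    (hnDict p).contains k = decide (k ∈ p) := by
  have hk : (hnDict p).keys = PySem.Set.update (PySem.Dict.empty : PySem.Dict Int Int).keys p :=
    PySem.Dict.keys_foldl_insert p (fun _ n => n) _
  rw [PySem.Dict.contains_eq_decide_mem_keys, hk]
  simp only [PySem.Set.mem_update, PySem.Dict.keys_empty,
    List.not_mem_nil, false_or]

lemma hnA_go (l p res : List Int) :
    (l.foldl
      (fun (st : PySem.Dict Int Int × List Int) n =>
        let d := st.1.insert n n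
        if n ≠ 0 ∧ d.contains (-n) then (d, st.2 ++ [|n|]) else (d, st.2))
      (hnDict p, res)).2 = res ++ hnRef p l := by
  induction l generalizing p res with
  | nil => simp [hnRef]
  | cons n l ih =>
    have hd : (hnDict p).insert n n = hnDict (p ++ [n]) := by
      simp [hnDict, List.foldl_append]
    have hc : ((hnDict p).insert n n).contains (-n) = decide (-n ∈ p ++ [n]) := by
      rw [hd, hnDict_contains]
    simp only [List.foldl_cons, hd]
    by_cases h0 : n = 0
    · simp [h0, hnRef, ih]
    · have hne : -n ≠ n := fun h => h0 (by omega)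
      by_cases hm : -n ∈ p
      · have ht : (hnDict (p ++ [n])).contains (-n) = true := by
          rw [hnDict_contains]; simp [hm]
        simp [h0, ht, hnRef, ih, hm]
      · have hf : (hnDict (p ++ [n])).contains (-n) = false := by
          rw [hnDict_contains]; simp [hm, hne]
        simp [h0, hf, hnRef, ih, hm]

-- first-occurrence index (the value hnFirst associates with a present key)
def hnIdx (k : Int) : List Int → Option Nat
  | [] => none
  | n :: l => if n = k then some 0 else (hnIdx k l).map (· + 1)

lemma hnFirst_go (l : List Int) (s : Int) (d : PySem.Dict Int Int) (k : Int) :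
    ((PySem.List.enumerate l s).foldr (fun p d => d.insert p.2 p.1) d).get? k =
      match hnIdx k l with
      | some j => some (s + j)
      | none => d.get? k := by
  induction l generalizing s d with
  | nil => simp [hnIdx, PySem.List.enumerate]
  | cons n l ih =>
    rw [PySem.List.enumerate_cons, List.foldr_cons]
    dsimp only
    rw [PySem.Dict.get?_insert]
    by_cases hk : k = n
    · subst hk
      simp [hnIdx]
    · have hk' : ¬ (n = k) := fun h => hk h.symm
      rw [if_neg hk, ih]
      simp only [hnIdx, if_neg hk']
      cases hnIdx k l with
      | none => simp
      | some j =>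
        simp only [Option.map_some]
        push_cast
        ring_nf

lemma hnFirst_get? (a : List Int) (k : Int) :
    (hnFirst a).get? k =
      match hnIdx k a with
      | some j => some (j : Int)
      | none => none := by
  unfold hnFirst
  rw [List.foldl_reverse, hnFirst_go a 0 PySem.Dict.empty k]
  cases hnIdx k a with
  | none => simp
  | some j => simp

lemma hnIdx_lt_iff (k : Int) (a : List Int) (i : Nat) :
    (match hnIdx k a with | some j => j < i | none => False) ↔ k ∈ a.take i := by
  induction a generalizing i with
  | nil => simp [hnIdx]
  | cons n l ih =>
    cases i with
    | zero =>
      simp only [List.take_zero, List.not_mem_nil, iff_false]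
      cases h : hnIdx k (n :: l) with
      | none => simp
      | some j => simp
    | succ i =>
      by_cases hk : n = k
      · simp [hnIdx, hk, List.take_succ_cons]
      · have hk' : ¬ (k = n) := fun h => hk h.symm
        simp only [hnIdx, if_neg hk, List.take_succ_cons, List.mem_cons, hk', false_or]
        rw [← ih i]
        cases hnIdx k l with
        | none => simp
        | some j => simp only [Option.map_some]; omega

lemma hnFirst_getD_lt (a p l : List Int) (n : Int) (h : a = p ++ n :: l) :
    ((hnFirst a).getD (-n) (p.length : Int) < (p.length : Int)) ↔ -n ∈ p := by
  rw [PySem.Dict.getD_eq_get?_getD, hnFirst_get?]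
  have htake : a.take p.length = p := by rw [h]; exact List.take_left
  rw [← htake, ← hnIdx_lt_iff (-n) a p.length]
  cases hnIdx (-n) a with
  | none => simp
  | some j =>
    have hlen : p.length ≤ a.length := by rw [h]; simp
    simp
    omega

lemma hnB_go (a l p res : List Int) (h : a = p ++ l) :
    ((PySem.List.enumerate l (p.length : Int)).foldl
      (fun res q => if q.2 ≠ 0 ∧ (hnFirst a).getD (-q.2) q.1 < q.1 then res ++ [|q.2|] else res)
      res) = res ++ hnRef p l := by
  induction l generalizing p res with
  | nil => simp [hnRef]
  | cons n l ih =>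
    rw [PySem.List.enumerate_cons, List.foldl_cons]
    have hcond : ((hnFirst a).getD (-n) (p.length : Int) < (p.length : Int)) ↔ -n ∈ p :=
      hnFirst_getD_lt a p l n h
    have hstep : ((p.length : Int) + 1) = ((p ++ [n]).length : Int) := by simp
    have h' : a = (p ++ [n]) ++ l := by rw [h]; simp
    have hrec := fun r => ih (p ++ [n]) r h'
    by_cases hc : n ≠ 0 ∧ -n ∈ p
    · rw [if_pos ⟨hc.1, hcond.mpr hc.2⟩, hstep, hrec _]
      simp [hnRef, hc.1, hc.2]
    · rw [if_neg (fun hx => hc ⟨hx.1, hcond.mp hx.2⟩), hstep, hrec _]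
      have : ¬ (n ≠ 0 ∧ -n ∈ p) := hc
      simp [hnRef, this]

-- ===== VERDICT (by name: the statement is the Claim_ definition above) =====
theorem has_negatives_spec : Claim_equal_has_negatives := by
  intro a _
  unfold Spec_has_negatives has_negatives has_negatives_alt
  exact (hnA_go a [] []).trans (hnB_go a a [] [] rfl).symm
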